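-- pv_equiv track=rewrite | github.com/S-Lucier/InstaWall | Tools/assemble_dataset.py | group_by_tag
-- ===== SOURCE A (Python) =====
-- from collections import defaultdict
--
-- def group_by_tag(all_tags, filenames, tag_list):
--     """Group filenames by which tag they have.
--
--     Args:
--         all_tags: Dict of filename -> list of tags
--         filenames: Set of filenames to consider
--         tag_list: List of tags to group by
--
--     Returns:
--         Dict of tag -> list of filenames
--     """
--     groups = defaultdict(list)
--
--     for filename in filenames:
--         tags = set(all_tags.get(filename, []))
--         for tag in tag_list:
--             if tag in tags:
--                 groups[tag].append(filename)
--                 break  # Only add to first matching group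
--
--     return groups
-- ===== SOURCE B (Python) =====
-- from collections import defaultdict
--
-- def group_by_tag(all_tags, filenames, tag_list):
--     """Group filenames by their first matching tag, via a tag->priority index."""
--     pos = {}
--     for i, t in enumerate(tag_list):
--         if t not in pos:
--             pos[t] = i
--     groups = defaultdict(list)
--     for filename in filenames:
--         best = None
--         for t in all_tags.get(filename, []):
--             j = pos.get(t)
--             if j is not None and (best is None or j < best):
--                 best = j
--         if best is not None:
--             groups[tag_list[best]].append(filename)
--     return groups
-- ===== Notes on version B (the rewrite author's own statement) =====
-- stated objective: faster
-- what changed: Instead of scanning tag_list from the front for every filename (with a break on the first tag present in the file's tag set), B builds a tag->priority index of tag_list once and, per filename, takes the minimum priority over the file's own tags, indexing tag_list at that minimum.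
import Mathlib
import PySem

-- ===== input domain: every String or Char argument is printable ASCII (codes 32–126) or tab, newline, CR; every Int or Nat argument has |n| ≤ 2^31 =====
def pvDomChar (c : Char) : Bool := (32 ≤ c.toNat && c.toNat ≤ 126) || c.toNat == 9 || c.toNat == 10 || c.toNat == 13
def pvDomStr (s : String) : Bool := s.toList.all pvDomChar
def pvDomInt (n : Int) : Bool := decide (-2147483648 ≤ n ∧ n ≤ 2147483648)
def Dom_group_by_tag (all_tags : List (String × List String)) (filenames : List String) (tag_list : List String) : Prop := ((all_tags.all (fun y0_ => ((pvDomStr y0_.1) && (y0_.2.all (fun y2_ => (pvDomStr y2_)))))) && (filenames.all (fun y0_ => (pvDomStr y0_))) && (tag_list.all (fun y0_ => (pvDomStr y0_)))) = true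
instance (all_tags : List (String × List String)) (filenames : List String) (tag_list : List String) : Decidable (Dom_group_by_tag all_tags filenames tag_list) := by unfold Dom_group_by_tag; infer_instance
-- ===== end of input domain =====

-- ===== PORT A =====
-- B replaces A's per-filename scan of tag_list with a tag->priority index and a min-index pass over each file's tags (alternative decomposition).
-- helper for A: the inner 'for tag in tag_list: if tag in tags: ... break' loop, returning the first matching tag
def pyFirstTag (tags : PySem.Set String) : List String → Option String
  | [] => none
  | t :: rest => if PySem.Set.contains tags t then some t else pyFirstTag tags rest

def group_by_tag (all_tags : List (String × List String)) (filenames : List String) (tag_list : List String) : List (String × List String) :=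
  (filenames.foldl (fun groups filename =>
      let tags : PySem.Set String := PySem.Set.ofList ((PySem.Dict.mk all_tags).getD filename [])
      match pyFirstTag tags tag_list with
      | some tag => groups.modify tag [] (fun l => l ++ [filename])
      | none => groups)
    PySem.Dict.empty).items

-- ===== PORT B =====
-- helper for B: pos = first-occurrence index of each tag in tag_list ('if t not in pos: pos[t] = i')
def pyTagPos (tag_list : List String) : PySem.Dict String Int :=
  (PySem.List.enumerate tag_list 0).foldl
    (fun d p => if d.contains p.2 then d else d.insert p.2 p.1) PySem.Dict.empty

def group_by_tag_alt (all_tags : List (String × List String)) (filenames : List String) (tag_list : List String) : List (String × List String) :=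
  let pos := pyTagPos tag_list
  (filenames.foldl (fun groups filename =>
      let best := ((PySem.Dict.mk all_tags).getD filename []).foldl
        (fun b t =>
          match pos.get? t with
          | some j =>
            match b with
            | none => some j
            | some k => if j < k then some j else b
          | none => b) (none : Option Int)
      match best with
      | some j => groups.modify ((PySem.List.pyGet? tag_list j).getD "") [] (fun l => l ++ [filename])
      | none => groups)
    PySem.Dict.empty).items

-- ===== PRECONDITION & SPEC =====
def Spec_group_by_tag (all_tags : List (String × List String)) (filenames : List String) (tag_list : List String) (out : List (String × List String)) : Prop := out = group_by_tag_alt all_tags filenames tag_list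
instance (all_tags : List (String × List String)) (filenames : List String) (tag_list : List String) (out : List (String × List String)) : Decidable (Spec_group_by_tag all_tags filenames tag_list out) := by unfold Spec_group_by_tag; infer_instance

-- ===== CLAIM (what is proved, stated in full; the proofs are below) =====
def Claim_equal_group_by_tag : Prop := ∀ (all_tags : List (String × List String)) (filenames : List String) (tag_list : List String), Dom_group_by_tag all_tags filenames tag_list → Spec_group_by_tag all_tags filenames tag_list (group_by_tag all_tags filenames tag_list)

-- ===== LEMMAS AND PROOFS =====

-- Nat-level version of B's min-index accumulator step
def stepN (L : List String) (b : Option Nat) (t : String) : Option Nat :=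
  match PySem.List.index? L t with
  | some j =>
    match b with
    | none => some j
    | some k => if j < k then some j else b
  | none => b

-- pyTagPos's lookup is the first-occurrence index in tag_list
lemma tagPos_fold_get (L : List String) (s : Int) (d : PySem.Dict String Int) (t : String) :
    (((PySem.List.enumerate L s).foldl
        (fun d p => if d.contains p.2 then d else d.insert p.2 p.1) d).get? t)
      = (d.get? t).or ((PySem.List.index? L t).map (fun n => (n : Int) + s)) := by
  induction L generalizing s d with
  | nil => cases h : d.get? t <;> simp [PySem.List.enumerate, h]
  | cons x L ih =>
    rw [PySem.List.enumerate_cons]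
    simp only [List.foldl_cons]
    by_cases hc : d.contains x = true
    · rw [if_pos hc, ih]
      cases h : d.get? t with
      | some v => simp
      | none =>
        have hne : x ≠ t := by
          intro he; subst he
          rw [PySem.Dict.get?_eq_none_iff_contains] at h
          simp [h] at hc
        rw [PySem.List.index?_cons_of_ne _ hne]
        cases hi : PySem.List.index? L t <;> simp <;> ring
    · rw [if_neg hc, ih]
      by_cases hxt : t = x
      · subst hxt
        have h : d.get? t = none := by
          rw [PySem.Dict.get?_eq_none_iff_contains]; simpa using hc
        rw [PySem.Dict.get?_insert_self, PySem.List.index?_cons_self, h]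
        simp
      · rw [PySem.Dict.get?_insert, if_neg hxt]
        cases h : d.get? t with
        | some v => simp
        | none =>
          rw [PySem.List.index?_cons_of_ne _ (Ne.symm hxt)]
          cases hi : PySem.List.index? L t <;> simp <;> ring

lemma tagPos_get (L : List String) (t : String) :
    (pyTagPos L).get? t = (PySem.List.index? L t).map (fun n => (n : Int)) := by
  rw [pyTagPos, tagPos_fold_get]
  cases hi : PySem.List.index? L t <;> simp

-- B's Int accumulator fold is the Nat fold, cast
lemma foldB_eq_foldN (L : List String) (ts : List String) (m : Option Nat) :
    ts.foldl
      (fun b t =>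
        match (pyTagPos L).get? t with
        | some j =>
          match b with
          | none => some j
          | some k => if j < k then some j else b
        | none => b) (m.map (fun n => (n : Int)))
      = (ts.foldl (stepN L) m).map (fun n => (n : Int)) := by
  induction ts generalizing m with
  | nil => rfl
  | cons t ts ih =>
    simp only [List.foldl_cons]
    have hstep :
        (match (pyTagPos L).get? t with
          | some j =>
            match m.map (fun n => (n : Int)) with
            | none => some j
            | some k => if j < k then some j else m.map (fun n => (n : Int))
          | none => m.map (fun n => (n : Int)))
          = (stepN L m t).map (fun n => (n : Int)) := by
      rw [tagPos_get, stepN]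
      cases hi : PySem.List.index? L t with
      | none => simp
      | some j =>
        cases m with
        | none => simp
        | some k =>
          by_cases hjk : j < k
          · have : (j : Int) < (k : Int) := by exact_mod_cast hjk
            simp [hjk, this]
          · have : ¬ ((j : Int) < (k : Int)) := by exact_mod_cast hjk
            simp [hjk, this]
    rw [hstep, ih]

-- once the accumulator hits index 0 it stays there
lemma foldN_zero (L : List String) (ts : List String) :
    ts.foldl (stepN L) (some 0) = some 0 := by
  induction ts with
  | nil => rfl
  | cons t ts ih =>
    simp only [List.foldl_cons]
    have : stepN L (some 0) t = some 0 := by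
      rw [stepN]; cases hi : PySem.List.index? L t <;> simp
    rw [this, ih]

lemma foldN_nil (ts : List String) (b : Option Nat) :
    ts.foldl (stepN []) b = b := by
  induction ts generalizing b with
  | nil => rfl
  | cons t ts ih =>
    simp only [List.foldl_cons]
    have : stepN [] b t = b := by rw [stepN]; simp [PySem.List.index?]
    rw [this, ih]

lemma foldN_cons (x : String) (L : List String) (ts : List String) (b : Option Nat) :
    ts.foldl (stepN (x :: L)) (b.map (· + 1))
      = if x ∈ ts then some 0 else (ts.foldl (stepN L) b).map (· + 1) := by
  induction ts generalizing b with
  | nil => simp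
  | cons t ts ih =>
    simp only [List.foldl_cons]
    by_cases hx : t = x
    · subst hx
      have : stepN (t :: L) (b.map (· + 1)) t = some 0 := by
        rw [stepN, PySem.List.index?_cons_self]
        cases b <;> simp
      rw [this, foldN_zero]
      simp
    · have hstep : stepN (x :: L) (b.map (· + 1)) t = (stepN L b t).map (· + 1) := by
        rw [stepN, stepN, PySem.List.index?_cons_of_ne _ (Ne.symm hx)]
        cases hi : PySem.List.index? L t with
        | none => simp
        | some j =>
          cases b with
          | none => simp
          | some k =>
            by_cases hjk : j < k
            · simp [hjk]
            · simp [hjk]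
      rw [hstep, ih]
      have hmem : (x ∈ t :: ts) ↔ x ∈ ts := by
        rw [List.mem_cons]
        constructor
        · rintro (he | hm)
          · exact (hx he.symm).elim
          · exact hm
        · exact Or.inr
      simp only [hmem]

-- main bridge: B's min-index (mapped through tag_list) is exactly A's first-matching-tag scan
lemma foldN_firstTag (L : List String) (ts : List String) :
    Option.map (fun j : Nat => (PySem.List.pyGet? L (j : Int)).getD "") (ts.foldl (stepN L) none)
      = pyFirstTag (PySem.Set.ofList ts) L := by
  induction L with
  | nil => rw [foldN_nil]; rfl
  | cons x L ih =>
    have hb : (none : Option Nat) = (none : Option Nat).map (· + 1) := rfl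
    rw [pyFirstTag]
    by_cases hx : x ∈ ts
    · have hc : PySem.Set.contains (PySem.Set.ofList ts) x = true := by
        simp [PySem.Set.contains, PySem.Set.mem_ofList, hx]
      rw [hb, foldN_cons, if_pos hx, hc]
      simp [PySem.List.pyGet?_natCast]
    · have hc : PySem.Set.contains (PySem.Set.ofList ts) x = false := by
        simp [PySem.Set.contains, PySem.Set.mem_ofList, hx]
      rw [hb, foldN_cons, if_neg hx, hc]
      simp only [Bool.false_eq_true, if_false]
      rw [← ih]
      cases h : ts.foldl (stepN L) none with
      | none => simp
      | some j =>
        simp only [Option.map_some]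
        rw [PySem.List.pyGet?_natCast, PySem.List.pyGet?_natCast]
        simp

-- B's fold started from the literal 'none' accumulator
lemma foldB_none (L : List String) (ts : List String) :
    ts.foldl
      (fun b t =>
        match (pyTagPos L).get? t with
        | some j =>
          match b with
          | none => some j
          | some k => if j < k then some j else b
        | none => b) (none : Option Int)
      = (ts.foldl (stepN L) none).map (fun n => (n : Int)) := by
  simpa using foldB_eq_foldN L ts none

-- the two per-filename loop bodies agree
lemma step_eq (all_tags : List (String × List String)) (tag_list : List String)
    (groups : PySem.Dict String (List String)) (filename : String) :
    (let tags : PySem.Set String := PySem.Set.ofList ((PySem.Dict.mk all_tags).getD filename [])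
     match pyFirstTag tags tag_list with
     | some tag => groups.modify tag [] (fun l => l ++ [filename])
     | none => groups)
      = (let best := ((PySem.Dict.mk all_tags).getD filename []).foldl
          (fun b t =>
            match (pyTagPos tag_list).get? t with
            | some j =>
              match b with
              | none => some j
              | some k => if j < k then some j else b
            | none => b) (none : Option Int)
         match best with
         | some j => groups.modify ((PySem.List.pyGet? tag_list j).getD "") [] (fun l => l ++ [filename])
         | none => groups) := by
  simp only []
  rw [foldB_none, ← foldN_firstTag]
  cases h : ((PySem.Dict.mk all_tags).getD filename []).foldl (stepN tag_list) none <;> simp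

-- ===== VERDICT (by name: the statement is the Claim_ definition above) =====
theorem group_by_tag_spec : Claim_equal_group_by_tag := by
  intro all_tags filenames tag_list _
  unfold Spec_group_by_tag group_by_tag group_by_tag_alt
  congr 2
  funext groups filename
  exact step_eq all_tags tag_list groups filename
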